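-- pv_equiv track=rewrite | github.com/aeroalgo/pair_analitycal | metrics/get_metrics.py | dd_abs
-- ===== SOURCE A (Python) =====
-- def dd_abs(cm_eq):
--     dd = []
--     max = 0
--     for i in cm_eq:
--         if i > max:
--             max = i
--         dd.append(i - max)
--     return dd
-- ===== SOURCE B (Python) =====
-- def dd_abs(cm_eq):
--     # Divide and conquer: drawdown of the right half only depends on the
--     # maximum of everything before it (floored at 0), passed down as m.
--     def solve(seg, m):
--         if len(seg) <= 1:
--             return [seg[0] - max(m, seg[0])] if seg else []
--         h = len(seg) // 2
--         return solve(seg[:h], m) + solve(seg[h:], max(m, *seg[:h]))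
--     return solve(cm_eq, 0)
-- ===== Notes on version B (the rewrite author's own statement) =====
-- stated objective: alternative
-- what changed: Replaces the single-pass loop with mutable running-max state by a divide-and-conquer recursion: split the list in half, solve the left half with the current floor, and solve the right half with the floor raised to the left half's maximum.
import Mathlib
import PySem

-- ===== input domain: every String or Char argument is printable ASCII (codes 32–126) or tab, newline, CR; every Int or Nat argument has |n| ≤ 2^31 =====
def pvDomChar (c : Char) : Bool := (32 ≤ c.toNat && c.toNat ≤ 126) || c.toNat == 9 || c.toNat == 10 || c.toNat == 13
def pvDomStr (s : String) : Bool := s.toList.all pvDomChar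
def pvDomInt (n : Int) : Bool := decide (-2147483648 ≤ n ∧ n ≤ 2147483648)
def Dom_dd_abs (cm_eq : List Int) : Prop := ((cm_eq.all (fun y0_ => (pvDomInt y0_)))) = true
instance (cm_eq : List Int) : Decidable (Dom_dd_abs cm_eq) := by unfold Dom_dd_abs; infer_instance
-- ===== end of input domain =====

-- ===== PORT A =====
-- B is a divide-and-conquer recursion instead of A's single mutable-state pass; return value only.
def dd_abs (cm_eq : List Int) : List Int :=
  (cm_eq.foldl (fun (s : List Int × Int) i =>
      let m := if i > s.2 then i else s.2
      (s.1 ++ [i - m], m)) ([], 0)).1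

-- ===== PORT B =====
-- solve(seg, m): drawdowns of seg given that the running maximum entering seg is m.
def ddSolve (seg : List Int) (m : Int) : List Int :=
  if seg.length ≤ 1 then
    match seg with
    | [] => []
    | x :: _ => [x - max m x]
  else
    let h := seg.length / 2
    ddSolve (seg.take h) m ++ ddSolve (seg.drop h) ((seg.take h).foldl max m)
termination_by seg.length
decreasing_by
  · simp only [List.length_take]; omega
  · simp only [List.length_drop]; omega

def dd_abs_alt (cm_eq : List Int) : List Int := ddSolve cm_eq 0

-- ===== PRECONDITION & SPEC =====
def Spec_dd_abs (cm_eq : List Int) (out : List Int) : Prop := out = dd_abs_alt cm_eq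
instance (cm_eq : List Int) (out : List Int) : Decidable (Spec_dd_abs cm_eq out) := by unfold Spec_dd_abs; infer_instance

-- ===== CLAIM (what is proved, stated in full; the proofs are below) =====
def Claim_equal_dd_abs : Prop := ∀ (cm_eq : List Int), Dom_dd_abs cm_eq → Spec_dd_abs cm_eq (dd_abs cm_eq)

-- ===== LEMMAS AND PROOFS =====
-- A's loop body, as a named step function.
def ddStep (s : List Int × Int) (i : Int) : List Int × Int :=
  let m := if i > s.2 then i else s.2
  (s.1 ++ [i - m], m)

theorem ddFold_acc (l : List Int) (acc : List Int) (m : Int) :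
    l.foldl ddStep (acc, m) = (acc ++ (l.foldl ddStep ([], m)).1, (l.foldl ddStep ([], m)).2) := by
  induction l generalizing acc m with
  | nil => simp
  | cons a t ih =>
      simp only [List.foldl, ddStep]
      rw [ih, ih ([] ++ [a - if a > m then a else m]) (if a > m then a else m)]
      simp

theorem ddFold_snd (l : List Int) (m : Int) :
    (l.foldl ddStep ([], m)).2 = l.foldl max m := by
  induction l generalizing m with
  | nil => rfl
  | cons a t ih =>
      simp only [List.foldl, ddStep]
      rw [ddFold_acc, ih]
      congr 1
      omega

theorem ddSolve_eq (l : List Int) (m : Int) :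
    ddSolve l m = (l.foldl ddStep ([], m)).1 := by
  induction l, m using ddSolve.induct with
  | case1 m h => rw [ddSolve.eq_def]; rfl
  | case2 m x tail hle =>
      cases tail with
      | nil =>
          rw [ddSolve.eq_def]; simp [ddStep, max_def]
          split <;> split <;> omega
      | cons b t' => simp at hle
  | case3 seg m hlen h ih1 ih2 =>
      rw [ddSolve.eq_def]
      simp only [if_neg hlen]
      rw [ih1, ih2]
      conv_rhs => rw [← List.take_append_drop (seg.length / 2) seg]
      rw [List.foldl_append, ddFold_acc, ddFold_snd]
      simp only [List.nil_append]
      conv_rhs => rw [ddFold_acc]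

-- ===== VERDICT (by name: the statement is the Claim_ definition above) =====
theorem dd_abs_spec : Claim_equal_dd_abs := by
  intro l _
  unfold Spec_dd_abs dd_abs dd_abs_alt
  rw [ddSolve_eq]
  rfl
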